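-- pv_equiv track=rewrite | github.com/ShambhaviRoy/Data-Structures-and-Algorithms | Miscellaneous-Practice-Questions/zigzag_array.py | zigzag_array
-- ===== SOURCE A (Python) =====
-- def zigzag_array(A):
--     answer = []
--     A.sort()
--
--     start = 0
--     end = len(A) - 1
--
--     while start <= end:
--         if start == end:
--             answer.append(A[start])
--         else:
--             answer.append(A[end])
--             answer.append(A[start])
--         start += 1
--         end -= 1
--     return answer
-- ===== SOURCE B (Python) =====
-- def zigzag_array(A):
--     A.sort()
--     half = len(A) // 2
--     lower = A[:half]
--     upper = A[half:][::-1]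
--     answer = []
--     for x, y in zip(upper, lower):
--         answer.append(x)
--         answer.append(y)
--     if len(A) % 2:
--         answer.append(A[half])
--     return answer
-- ===== Notes on version B (the rewrite author's own statement) =====
-- stated objective: alternative
-- what changed: Replaces the converging two-pointer while loop with a start==end branch by splitting the sorted list into lower/reversed-upper halves and interleaving them with zip, appending the middle element separately for odd lengths.
import Mathlib
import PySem

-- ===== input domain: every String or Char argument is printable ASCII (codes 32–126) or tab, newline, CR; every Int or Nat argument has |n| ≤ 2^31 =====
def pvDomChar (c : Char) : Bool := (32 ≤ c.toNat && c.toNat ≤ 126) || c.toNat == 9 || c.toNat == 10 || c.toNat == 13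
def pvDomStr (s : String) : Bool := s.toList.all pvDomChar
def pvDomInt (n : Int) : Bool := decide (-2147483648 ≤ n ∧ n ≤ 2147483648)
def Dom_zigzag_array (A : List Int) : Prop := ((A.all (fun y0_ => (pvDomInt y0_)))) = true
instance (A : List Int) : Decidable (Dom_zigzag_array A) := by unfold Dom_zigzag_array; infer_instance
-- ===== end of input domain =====

-- B replaces A's converging two-pointer loop by splitting the sorted list into lower/reversed-upper
-- halves and interleaving them (zip), appending the middle element for odd lengths; same cost.
-- Both A and B sort the argument list in place in Python; the equivalence proved is about the return value.

-- ===== PORT A =====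
-- the while loop of A: answer is built head-first; A[start]/A[end] are always in range
-- while the loop runs (0 ≤ start ≤ end ≤ len-1), so pyGetD with default 0 is exact.
def zzLoopA (s : List Int) (start endi : Int) : List Int :=
  if _h : start ≤ endi then
    if start = endi then [PySem.List.pyGetD s start 0]
    else PySem.List.pyGetD s endi 0 :: PySem.List.pyGetD s start 0 ::
         zzLoopA s (start + 1) (endi - 1)
  else []
termination_by (endi - start).toNat
decreasing_by omega

def zigzag_array (A : List Int) : List Int :=
  let s := PySem.List.sorted A (fun x => x) false   -- A.sort()
  zzLoopA s 0 ((s.length : Int) - 1)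

-- ===== PORT B =====
def zigzag_array_alt (A : List Int) : List Int :=
  let s := PySem.List.sorted A (fun x => x) false                              -- A.sort()
  let half : Int := PySem.Int.floordiv (s.length : Int) 2                      -- len(A) // 2
  let lower := PySem.List.slice s none (some half)                             -- A[:half]
  let upper := (PySem.List.slice? (PySem.List.slice s (some half) none)
                  none none (-1)).getD []                                      -- A[half:][::-1]
  let answer := (upper.zip lower).foldl (fun acc p => acc ++ [p.1, p.2]) []    -- for x,y in zip: append x; append y
  if PySem.Int.mod (s.length : Int) 2 ≠ 0 then
    answer ++ [PySem.List.pyGetD s half 0]                                     -- if len(A) % 2: append A[half]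
  else answer

-- ===== PRECONDITION & SPEC =====
def Spec_zigzag_array (A : List Int) (out : List Int) : Prop := out = zigzag_array_alt A
instance (A : List Int) (out : List Int) : Decidable (Spec_zigzag_array A out) := by unfold Spec_zigzag_array; infer_instance

-- ===== CLAIM (what is proved, stated in full; the proofs are below) =====
def Claim_equal_zigzag_array : Prop := ∀ (A : List Int), Dom_zigzag_array A → Spec_zigzag_array A (zigzag_array A)

-- ===== LEMMAS AND PROOFS =====

-- B's core, written over the sorted list: interleave reversed upper half with lower half, plus middle.
def segB (l : List Int) : List Int :=
  (((l.drop (l.length / 2)).reverse.zip (l.take (l.length / 2))).foldl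
      (fun acc p => acc ++ [p.1, p.2]) [])
  ++ (if l.length % 2 = 1 then [l.getD (l.length / 2) 0] else [])

lemma foldl_pairs (ps : List (Int × Int)) (acc : List Int) :
    ps.foldl (fun a p => a ++ [p.1, p.2]) acc
      = acc ++ ps.foldl (fun a p => a ++ [p.1, p.2]) [] := by
  induction ps generalizing acc with
  | nil => simp
  | cons p ps ih => simp [List.foldl_cons, ih (acc ++ [p.1, p.2]), ih [p.1, p.2]]

lemma segB_single (x : Int) : segB [x] = [x] := by simp [segB]

lemma segB_pair (x a : Int) (m : List Int) :
    segB (x :: m ++ [a]) = a :: x :: segB m := by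
  have hlen : (x :: m ++ [a]).length = m.length + 2 := by simp
  have hdiv : (m.length + 2) / 2 = m.length / 2 + 1 := by omega
  have hle : m.length / 2 ≤ m.length := Nat.div_le_self _ _
  have htake : (x :: m ++ [a]).take ((x :: m ++ [a]).length / 2)
      = x :: m.take (m.length / 2) := by
    rw [hlen, hdiv]
    simp [List.take_append_of_le_length hle]
  have hdrop : (x :: m ++ [a]).drop ((x :: m ++ [a]).length / 2)
      = m.drop (m.length / 2) ++ [a] := by
    rw [hlen, hdiv]
    simp [List.drop_append_of_le_length hle]
  unfold segB
  rw [htake, hdrop, hlen]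
  rw [List.reverse_append, List.reverse_singleton, List.singleton_append,
      List.zip_cons_cons, List.foldl_cons, foldl_pairs]
  have hmod : (m.length + 2) % 2 = m.length % 2 := by omega
  rw [hmod]
  by_cases hodd : m.length % 2 = 1
  · have hlt : m.length / 2 < m.length := by omega
    simp [hodd, hdiv, List.getElem?_append_left hlt]
  · simp [hodd]

lemma pyGetD_append_cons (pre : List Int) (y : Int) (ys : List Int) :
    PySem.List.pyGetD (pre ++ y :: ys) (pre.length : Int) 0 = y := by
  simp [PySem.List.pyGetD_natCast, List.getD_eq_getElem?_getD]

-- A's loop, run over the middle segment l of pre ++ l ++ post, produces segB l.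
lemma loopA_eq (n : Nat) :
    ∀ (l pre post : List Int), l.length = n →
      zzLoopA (pre ++ l ++ post) (pre.length : Int)
        ((pre.length : Int) + (l.length : Int) - 1) = segB l := by
  induction n using Nat.strong_induction_on with
  | _ n ih =>
    intro l pre post hn
    match l with
    | [] =>
      rw [zzLoopA]
      simp [segB]
    | [x] =>
      rw [zzLoopA]
      have h1 : (pre.length : Int) + ([x] : List Int).length - 1 = (pre.length : Int) := by
        simp
      rw [h1]
      simp [segB_single]
    | x :: y :: rest =>
      -- decompose the tail as middle ++ [last]
      have hne : (y :: rest) ≠ ([] : List Int) := by simp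
      obtain ⟨m, a, hma⟩ : ∃ m a, y :: rest = m ++ [a] :=
        ⟨(y :: rest).dropLast, (y :: rest).getLast hne, (List.dropLast_append_getLast hne).symm⟩
      have hl : x :: y :: rest = x :: m ++ [a] := by rw [hma]; simp
      have hnn : n = m.length + 2 := by
        have h' := congrArg List.length hl
        rw [hn] at h'
        simpa using h'
      rw [hl]
      rw [zzLoopA]
      have hlen : ((x :: m ++ [a]) : List Int).length = m.length + 2 := by simp
      rw [hlen]
      push_cast
      rw [dif_pos (by omega), if_neg (by omega)]
      -- the three pieces: s[end] = a, s[start] = x, recursive call = segB m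
      have hstart : PySem.List.pyGetD (pre ++ (x :: m ++ [a]) ++ post) (pre.length : Int) 0 = x := by
        have : pre ++ (x :: m ++ [a]) ++ post = pre ++ x :: (m ++ [a] ++ post) := by simp
        rw [this, pyGetD_append_cons]
      have hendval : PySem.List.pyGetD (pre ++ (x :: m ++ [a]) ++ post)
          ((pre.length : Int) + ((m.length : Int) + 2) - 1) 0 = a := by
        have hre : pre ++ (x :: m ++ [a]) ++ post = (pre ++ x :: m) ++ a :: post := by simp
        have hidx : (pre.length : Int) + ((m.length : Int) + 2) - 1
            = (((pre ++ x :: m).length : Nat) : Int) := by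
          simp only [List.length_append, List.length_cons]; push_cast; omega
        rw [hre, hidx, pyGetD_append_cons]
      have hrec : zzLoopA (pre ++ (x :: m ++ [a]) ++ post) ((pre.length : Int) + 1)
          ((pre.length : Int) + ((m.length : Int) + 2) - 1 - 1) = segB m := by
        have hre : pre ++ (x :: m ++ [a]) ++ post = (pre ++ [x]) ++ m ++ ([a] ++ post) := by simp
        have h1 : (pre.length : Int) + 1 = (((pre ++ [x]).length : Nat) : Int) := by
          simp only [List.length_append, List.length_cons, List.length_nil]; push_cast; omega
        have h2 : (pre.length : Int) + ((m.length : Int) + 2) - 1 - 1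
            = (((pre ++ [x]).length : Nat) : Int) + (m.length : Int) - 1 := by
          simp only [List.length_append, List.length_cons, List.length_nil]; push_cast; omega
        rw [hre, h1, h2]
        exact ih m.length (by omega) m (pre ++ [x]) ([a] ++ post) rfl
      rw [hstart, hendval, hrec, segB_pair]

lemma alt_eq_segB (A : List Int) :
    zigzag_array_alt A = segB (PySem.List.sorted A (fun x => x) false) := by
  simp only [zigzag_array_alt, segB]
  set s := PySem.List.sorted A (fun x => x) false with hs
  have hhalf : PySem.Int.floordiv (s.length : Int) 2 = ((s.length / 2 : Nat) : Int) := by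
    exact_mod_cast PySem.Int.floordiv_natCast s.length 2
  have hmod : PySem.Int.mod (s.length : Int) 2 = ((s.length % 2 : Nat) : Int) := by
    exact_mod_cast PySem.Int.mod_natCast s.length 2
  rw [hhalf, hmod]
  rw [PySem.List.slice_to_natCast, PySem.List.slice_from_natCast,
      PySem.List.slice?_none_none_neg_one]
  simp only [Option.getD_some]
  by_cases hodd : s.length % 2 = 1
  · rw [hodd, if_pos (show ((1:Nat):Int) ≠ 0 by norm_num), if_pos rfl,
        PySem.List.pyGetD_natCast]
  · have h0 : s.length % 2 = 0 := by omega
    rw [h0, if_neg (show ¬ ((0:Nat):Int) ≠ 0 by norm_num),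
        if_neg (show ¬ (0 = 1) by norm_num), List.append_nil]

lemma a_eq_segB (A : List Int) :
    zigzag_array A = segB (PySem.List.sorted A (fun x => x) false) := by
  unfold zigzag_array
  set s := PySem.List.sorted A (fun x => x) false with hs
  simpa using loopA_eq s.length s [] [] rfl

-- ===== VERDICT (by name: the statement is the Claim_ definition above) =====
theorem zigzag_array_spec : Claim_equal_zigzag_array := by
  intro A _
  unfold Spec_zigzag_array
  rw [a_eq_segB, alt_eq_segB]
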